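-- pv_equiv track=rewrite | github.com/mcroomp/windpower | simulation/analysis/analyse_run.py | _flag_transitions
-- ===== SOURCE A (Python) =====
-- def _flag_transitions(ekf_flags: list) -> list:
--     """Return list of (timestamp, old_flags, new_flags) on any change."""
--     transitions = []
--     prev = None
--     for ts, f in ekf_flags:
--         if f != prev:
--             transitions.append((ts, prev if prev is not None else 0, f))
--             prev = f
--     return transitions
-- ===== SOURCE B (Python) =====
-- def _flag_transitions(ekf_flags: list) -> list:
--     """Return list of (timestamp, old_flags, new_flags) on any change."""
--     # Stage 1: collapse the series into maximal runs of equal flag,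
--     # keeping each run's first (timestamp, flag).
--     runs = []
--     i, n = 0, len(ekf_flags)
--     while i < n:
--         ts, f = ekf_flags[i]
--         runs.append((ts, f))
--         j = i + 1
--         while j < n and ekf_flags[j][1] == f:
--             j += 1
--         i = j
--     # Stage 2: each run starts a transition from the previous run's flag
--     # (0 before the first run); pair runs with the shifted flag list.
--     return [(ts, old, f) for (ts, f), old in zip(runs, [0] + [f for _, f in runs])]
-- ===== Notes on version B (the rewrite author's own statement) =====
-- stated objective: alternative
-- what changed: Replaced the single stateful scan with an Optional prev sentinel by a two-stage algorithm: an inner while-loop collapses the series into maximal runs of equal flag, then transitions are emitted by zipping the run list with its flag list shifted by a leading 0.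
import Mathlib
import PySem

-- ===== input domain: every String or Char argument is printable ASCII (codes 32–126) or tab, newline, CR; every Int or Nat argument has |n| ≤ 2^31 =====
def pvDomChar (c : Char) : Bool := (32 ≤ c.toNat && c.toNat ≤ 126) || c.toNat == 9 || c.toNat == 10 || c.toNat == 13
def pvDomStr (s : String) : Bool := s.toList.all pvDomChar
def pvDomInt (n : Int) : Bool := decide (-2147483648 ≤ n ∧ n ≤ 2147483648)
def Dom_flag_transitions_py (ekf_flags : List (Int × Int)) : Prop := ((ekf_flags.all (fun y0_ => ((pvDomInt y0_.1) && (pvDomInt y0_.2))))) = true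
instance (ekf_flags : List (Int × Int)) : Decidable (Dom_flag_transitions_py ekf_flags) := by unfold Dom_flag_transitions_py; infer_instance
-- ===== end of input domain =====

-- B replaces A's stateful prev-sentinel scan with a two-stage run-grouping (collapse into maximal runs, then zip runs with their shifted flag list); alternative decomposition, same O(n).
-- ===== PORT A =====
-- Literal port of A: one fold carrying accumulator `transitions` and Optional `prev`.
def flagLoopA (acc : List (Int × Int × Int)) (prev : Option Int) : List (Int × Int) → List (Int × Int × Int)
  | [] => acc
  | (ts, f) :: rest =>
    if some f ≠ prev then
      flagLoopA (acc ++ [(ts, prev.getD 0, f)]) (some f) rest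
    else
      flagLoopA acc prev rest

def flag_transitions_py (ekf_flags : List (Int × Int)) : List (Int × Int × Int) :=
  flagLoopA [] none ekf_flags

-- ===== PORT B =====
-- Stage 1 of B: the inner while-loop — drop the leading maximal run of flag `f`.
def skipRun (f : Int) : List (Int × Int) → List (Int × Int)
  | [] => []
  | (ts, g) :: rest => if g = f then skipRun f rest else (ts, g) :: rest

lemma skipRun_length_le (f : Int) : ∀ xs : List (Int × Int), (skipRun f xs).length ≤ xs.length
  | [] => le_refl _
  | (_, g) :: rest => by
      simp only [skipRun]
      split
      · exact (skipRun_length_le f rest).trans (Nat.le_succ _)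
      · exact le_refl _

-- Stage 1 of B: the outer while-loop — collect (first timestamp, flag) of each maximal run.
def buildRuns : List (Int × Int) → List (Int × Int)
  | [] => []
  | (ts, f) :: rest => (ts, f) :: buildRuns (skipRun f rest)
termination_by xs => xs.length
decreasing_by exact Nat.lt_succ_of_le (skipRun_length_le f rest)

-- Stage 2 of B: zip the runs with the shifted flag list (leading 0).
def flag_transitions_py_alt (ekf_flags : List (Int × Int)) : List (Int × Int × Int) :=
  let runs := buildRuns ekf_flags
  (runs.zip (0 :: runs.map Prod.snd)).map (fun p => (p.1.1, p.2, p.1.2))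
-- ===== PRECONDITION & SPEC =====
def Spec_flag_transitions_py (ekf_flags : List (Int × Int)) (out : List (Int × Int × Int)) : Prop := out = flag_transitions_py_alt ekf_flags
instance (ekf_flags : List (Int × Int)) (out : List (Int × Int × Int)) : Decidable (Spec_flag_transitions_py ekf_flags out) := by unfold Spec_flag_transitions_py; infer_instance

-- ===== CLAIM (what is proved, stated in full; the proofs are below) =====
def Claim_equal_flag_transitions_py : Prop := ∀ (ekf_flags : List (Int × Int)), Dom_flag_transitions_py ekf_flags → Spec_flag_transitions_py ekf_flags (flag_transitions_py ekf_flags)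

-- ===== LEMMAS AND PROOFS =====
-- Proof-only helper: the canonical emission of runs with a running old-flag.
def emitRuns (old : Int) : List (Int × Int) → List (Int × Int × Int)
  | [] => []
  | (ts, f) :: rest => (ts, old, f) :: emitRuns f rest

lemma zip_emit : ∀ (runs : List (Int × Int)) (old : Int),
    (runs.zip (old :: runs.map Prod.snd)).map (fun p => (p.1.1, p.2, p.1.2)) = emitRuns old runs
  | [], _ => rfl
  | (ts, f) :: rest, old => by
      simp only [List.map, List.zip, List.zipWith, emitRuns]
      exact congrArg _ (zip_emit rest f)

lemma loop_emit : ∀ (xs : List (Int × Int)) (f : Int) (acc : List (Int × Int × Int)),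
    flagLoopA acc (some f) xs = acc ++ emitRuns f (buildRuns (skipRun f xs)) := by
  intro xs
  induction xs with
  | nil => intro f acc; simp [flagLoopA, skipRun, buildRuns, emitRuns]
  | cons hd rest ih =>
    intro f acc
    obtain ⟨ts, g⟩ := hd
    by_cases h : g = f
    · subst h
      simp only [flagLoopA, skipRun]
      simpa using ih g acc
    · simp only [flagLoopA, skipRun, if_neg h, buildRuns, emitRuns]
      simp only [if_pos (by simp [h] : some g ≠ some f), Option.getD_some]
      rw [ih g (acc ++ [(ts, f, g)])]
      simp

-- ===== VERDICT (by name: the statement is the Claim_ definition above) =====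
theorem flag_transitions_py_spec : Claim_equal_flag_transitions_py := by
  intro ekf_flags _
  unfold Spec_flag_transitions_py flag_transitions_py flag_transitions_py_alt
  match ekf_flags with
  | [] => simp [flagLoopA, buildRuns]
  | (ts0, f0) :: rest =>
    simp only [buildRuns, zip_emit, emitRuns]
    simp only [flagLoopA, if_pos (by simp : some f0 ≠ (none : Option Int)), Option.getD_none,
      List.nil_append]
    rw [loop_emit rest f0 [(ts0, 0, f0)]]
    rfl
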